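-- pv_equiv track=rewrite | github.com/muhjav1/COMP170_Spring25_FinalProject | Username Generator v1.0.py | check_lname
-- ===== SOURCE A (Python) =====
-- def check_lname(lowercase_lname): #Checks truth value for last name validity(must be empty of special characters and numbers). True/False will be used to determine whether to prompt the user again or use the input given
--     hasDigit = False
--     hasSpecial = False
--     special = '''!@$%^&*()_-+={[}]|\:;"'<,>.'''
--     for letter in lowercase_lname:
--         if letter.isdigit():
--             hasDigit = True
--             break
--     for letter in lowercase_lname:
--         if letter in special:
--             hasSpecial = True
--             break
--     return hasDigit, hasSpecial
-- ===== SOURCE B (Python) =====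
-- def check_lname(lowercase_lname):
--     special = '''!@$%^&*()_-+={[}]|\:;"'<,>.'''
--     hasDigit = False
--     hasSpecial = False
--     for letter in lowercase_lname:
--         hasDigit = hasDigit or letter.isdigit()
--         hasSpecial = hasSpecial or (letter in special)
--         if hasDigit and hasSpecial:
--             break
--     return hasDigit, hasSpecial
-- ===== Notes on version B (the rewrite author's own statement) =====
-- stated objective: alternative
-- what changed: Replaces A's two independent sequential scans (one for digits, one for special characters) with a single combined pass that maintains both flags and stops as soon as both are set.
import Mathlib
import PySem

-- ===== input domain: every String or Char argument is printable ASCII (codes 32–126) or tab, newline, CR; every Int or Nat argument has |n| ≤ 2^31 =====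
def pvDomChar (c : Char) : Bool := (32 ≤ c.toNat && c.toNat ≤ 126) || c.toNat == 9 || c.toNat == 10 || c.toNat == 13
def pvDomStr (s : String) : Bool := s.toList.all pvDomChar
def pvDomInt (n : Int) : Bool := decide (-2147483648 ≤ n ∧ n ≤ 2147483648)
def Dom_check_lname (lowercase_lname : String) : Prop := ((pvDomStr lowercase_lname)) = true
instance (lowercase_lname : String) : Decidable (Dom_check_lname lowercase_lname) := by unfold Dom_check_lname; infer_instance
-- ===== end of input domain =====

-- B fuses A's two separate scans into one pass over the characters that keeps both
-- flags and stops once both are set (alternative decomposition; same cost).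


-- ===== PORT A =====
-- the Python special string '''!@$%^&*()_-+={[}]|\:;"'<,>.''' (backslash is a literal char)
def pvSpecial : List Char := ['!', '@', '$', '%', '^', '&', '*', '(', ')', '_', '-', '+', '=', '{', '[', '}', ']', '|', '\\', ':', ';', '"', '\'', '<', ',', '>', '.']

-- first for-loop of A: scan for a digit, break on first hit
def chkDigitLoop : List Char → Bool
  | [] => false
  | c :: rest => if PySem.Chars.isdigit c then true else chkDigitLoop rest

-- second for-loop of A: scan for a special character, break on first hit
def chkSpecialLoop : List Char → Bool
  | [] => false
  | c :: rest => if pvSpecial.contains c then true else chkSpecialLoop rest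

def check_lname (lowercase_lname : String) : Bool × Bool :=
  (chkDigitLoop lowercase_lname.toList, chkSpecialLoop lowercase_lname.toList)

-- ===== PORT B =====
-- the single fused loop of B: maintain both flags, break when both are set
def chkBothLoop : List Char → Bool → Bool → Bool × Bool
  | [], hasDigit, hasSpecial => (hasDigit, hasSpecial)
  | c :: rest, hasDigit, hasSpecial =>
    let hasDigit := hasDigit || PySem.Chars.isdigit c
    let hasSpecial := hasSpecial || pvSpecial.contains c
    if hasDigit && hasSpecial then (hasDigit, hasSpecial)
    else chkBothLoop rest hasDigit hasSpecial

def check_lname_alt (lowercase_lname : String) : Bool × Bool :=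
  chkBothLoop lowercase_lname.toList false false

-- ===== PRECONDITION & SPEC =====
def Spec_check_lname (lowercase_lname : String) (out : Bool × Bool) : Prop := out = check_lname_alt lowercase_lname
instance (lowercase_lname : String) (out : Bool × Bool) : Decidable (Spec_check_lname lowercase_lname out) := by unfold Spec_check_lname; infer_instance

-- ===== CLAIM (what is proved, stated in full; the proofs are below) =====
def Claim_equal_check_lname : Prop := ∀ (lowercase_lname : String), Dom_check_lname lowercase_lname → Spec_check_lname lowercase_lname (check_lname lowercase_lname)

-- ===== LEMMAS AND PROOFS =====
-- loop invariant: the fused loop computes the or of the incoming flags with the two scans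
theorem chkBothLoop_eq (l : List Char) : ∀ (d s : Bool),
    chkBothLoop l d s = (d || chkDigitLoop l, s || chkSpecialLoop l) := by
  induction l with
  | nil => intro d s; simp [chkBothLoop, chkDigitLoop, chkSpecialLoop]
  | cons c rest ih =>
    intro d s
    simp only [chkBothLoop, chkDigitLoop, chkSpecialLoop]
    by_cases hd : PySem.Chars.isdigit c <;> by_cases hs : pvSpecial.contains c <;>
      simp [hd, hs, ih] <;> cases d <;> cases s <;> simp <;> tauto

-- ===== VERDICT (by name: the statement is the Claim_ definition above) =====
theorem check_lname_spec : Claim_equal_check_lname := by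
  intro s _
  show _ = _
  simp [check_lname, check_lname_alt, chkBothLoop_eq]
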